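-- pv_equiv track=rewrite | github.com/JiyooonPark/Algorithm | ThisIsTheRealCodingTest/220610/binary_search2.py | solution
-- ===== SOURCE A (Python) =====
-- def solution(storage, request):
--     storage.sort()
--     answer =''
--     for i in request:
--         start, end = 0, len(storage) - 1
--         while start<=end:
--             mid = (start+end)//2
--             if storage[mid] == i:
--                 answer += "Yes "
--                 break
--             elif storage[mid]<i:
--                 start = mid+1
--             else:
--                 end = mid-1
--         if start>end:
--             answer+="No "
--     return answer
-- ===== SOURCE B (Python) =====
-- def solution(storage, request):
--     storage.sort()          # keep A's in-place sort side effect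
--     present = set(storage)
--     return ''.join("Yes " if i in present else "No " for i in request)
-- ===== Notes on version B (the rewrite author's own statement) =====
-- stated objective: faster
-- what changed: Replaces the per-request hand-written binary-search loop with a hash set built once, answering each request by O(1) membership and joining the 'Yes '/'No ' pieces; the in-place storage.sort() side effect is kept.
import Mathlib
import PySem

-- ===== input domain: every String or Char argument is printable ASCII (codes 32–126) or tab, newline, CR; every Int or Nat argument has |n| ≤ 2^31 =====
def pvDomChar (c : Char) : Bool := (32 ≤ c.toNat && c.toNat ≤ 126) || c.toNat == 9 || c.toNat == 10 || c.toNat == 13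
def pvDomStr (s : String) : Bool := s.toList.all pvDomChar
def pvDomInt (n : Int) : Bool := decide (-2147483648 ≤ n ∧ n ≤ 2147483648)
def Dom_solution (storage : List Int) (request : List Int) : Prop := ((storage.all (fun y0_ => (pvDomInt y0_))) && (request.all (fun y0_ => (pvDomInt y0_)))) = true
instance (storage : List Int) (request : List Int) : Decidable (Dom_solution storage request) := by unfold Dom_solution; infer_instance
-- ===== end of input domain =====

-- B answers each request by membership in a set built once instead of A's binary search;
-- both Pythons sort `storage` in place (the equivalence proved here is about the return value).

-- ===== PORT A =====
-- A's while-loop: binary search for i in the sorted list between indices start and e;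
-- returns true exactly when A appends "Yes " (break), false when the loop ends with start > e ("No ").
def solBS (st : List Int) (i : Int) (start e : Int) : Bool :=
  if h : start ≤ e then
    -- storage[mid]: always in range for A's calls (0 ≤ start ≤ mid ≤ e < len), total form pyGetD
    if PySem.List.pyGetD st (PySem.Int.floordiv (start + e) 2) 0 = i then true
    else if PySem.List.pyGetD st (PySem.Int.floordiv (start + e) 2) 0 < i then
      solBS st i (PySem.Int.floordiv (start + e) 2 + 1) e
    else solBS st i start (PySem.Int.floordiv (start + e) 2 - 1)
  else false
termination_by (e + 1 - start).toNat
decreasing_by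
  · have := PySem.Int.floordiv_two_mid_bounds h; omega
  · have := PySem.Int.floordiv_two_mid_bounds h; omega

def solution (storage : List Int) (request : List Int) : String :=
  let st := PySem.List.sorted storage (fun x => x)
  request.foldl
    (fun acc i =>
      if solBS st i 0 ((st.length : Int) - 1) then acc ++ "Yes " else acc ++ "No ")
    ""

-- ===== PORT B =====
def solution_alt (storage : List Int) (request : List Int) : String :=
  let st := PySem.List.sorted storage (fun x => x)
  let present : PySem.Set Int := PySem.Set.ofList st
  PySem.Str.join "" (request.map (fun i => if PySem.Set.contains present i then "Yes " else "No "))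

-- ===== PRECONDITION & SPEC =====
def Spec_solution (storage : List Int) (request : List Int) (out : String) : Prop := out = solution_alt storage request
instance (storage : List Int) (request : List Int) (out : String) : Decidable (Spec_solution storage request out) := by unfold Spec_solution; infer_instance

-- ===== CLAIM (what is proved, stated in full; the proofs are below) =====
def Claim_equal_solution : Prop := ∀ (storage : List Int) (request : List Int), Dom_solution storage request → Spec_solution storage request (solution storage request)

-- ===== LEMMAS AND PROOFS =====

-- A's binary search on a (≤)-sorted list succeeds iff the target occurs at some index in [start, e].
lemma solBS_iff (st : List Int) (i : Int) (hs : st.Pairwise (· ≤ ·)) :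
    ∀ (n : Nat) (start e : Int), (e + 1 - start).toNat ≤ n → 0 ≤ start → e < (st.length : Int) →
      (solBS st i start e = true ↔ ∃ k : Nat, start ≤ (k : Int) ∧ (k : Int) ≤ e ∧ st[k]? = some i) := by
  intro n
  induction n with
  | zero =>
    intro start e hn h0 he
    have hlt : e < start := by omega
    rw [solBS, dif_neg (by omega)]
    simp only [Bool.false_eq_true, false_iff]
    rintro ⟨k, hk1, hk2, -⟩; omega
  | succ n ih =>
    intro start e hn h0 he
    by_cases hle : start ≤ e
    · have hmid := PySem.Int.floordiv_two_mid_bounds hle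
      set m : Int := PySem.Int.floordiv (start + e) 2 with hm
      have hm0 : 0 ≤ m := by omega
      have hmlen : m.toNat < st.length := by omega
      have hcast : m = ((m.toNat : Nat) : Int) := by omega
      have hget : PySem.List.pyGetD st m 0 = st[m.toNat] :=
        PySem.List.pyGetD_eq_getElem st 0 hm0 (by omega)
      rw [solBS, dif_pos hle, ← hm, hget]
      have hmono : ∀ p q : Nat, (hpq : p ≤ q) → (hq : q < st.length) →
          st[p]'(Nat.lt_of_le_of_lt hpq hq) ≤ st[q]'hq := by
        intro p q hpq hq
        rcases Nat.lt_or_ge p q with hlt | hge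
        · exact (List.pairwise_iff_getElem.mp hs) p q (by omega) hq hlt
        · have : p = q := by omega
          subst this; exact le_refl _
      by_cases heq : st[m.toNat] = i
      · simp only [if_pos heq, true_iff]
        exact ⟨m.toNat, by omega, by omega, by rw [List.getElem?_eq_getElem hmlen, heq]⟩
      · rw [if_neg heq]
        by_cases hlt : st[m.toNat] < i
        · rw [if_pos hlt]
          rw [ih (m + 1) e (by omega) (by omega) he]
          constructor
          · rintro ⟨k, hk1, hk2, hk3⟩; exact ⟨k, by omega, hk2, hk3⟩
          · rintro ⟨k, hk1, hk2, hk3⟩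
            refine ⟨k, ?_, hk2, hk3⟩
            by_contra hko
            have hkm : k ≤ m.toNat := by omega
            have hkl : k < st.length := by omega
            have : st[k]'hkl ≤ st[m.toNat] := hmono k m.toNat hkm hmlen
            have : st[k]'hkl = i := by
              have := hk3; rw [List.getElem?_eq_getElem hkl] at this
              exact Option.some.inj this
            omega
        · rw [if_neg hlt]
          have hgt : i < st[m.toNat] := by omega
          rw [ih start (m - 1) (by omega) h0 (by omega)]
          constructor
          · rintro ⟨k, hk1, hk2, hk3⟩; exact ⟨k, hk1, by omega, hk3⟩
          · rintro ⟨k, hk1, hk2, hk3⟩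
            refine ⟨k, hk1, ?_, hk3⟩
            by_contra hko
            have hkm : m.toNat ≤ k := by omega
            have hkl : k < st.length := by omega
            have : st[m.toNat] ≤ st[k]'hkl := hmono m.toNat k hkm hkl
            have : st[k]'hkl = i := by
              have := hk3; rw [List.getElem?_eq_getElem hkl] at this
              exact Option.some.inj this
            omega
    · rw [solBS, dif_neg hle]
      simp only [Bool.false_eq_true, false_iff]
      rintro ⟨k, hk1, hk2, -⟩; omega

-- on a sorted list, A's full-range binary search is exactly membership
lemma solBS_eq_mem (st : List Int) (i : Int) (hs : st.Pairwise (· ≤ ·)) :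
    solBS st i 0 ((st.length : Int) - 1) = decide (i ∈ st) := by
  rcases Bool.decide_iff (i ∈ st) with _
  by_cases hmem : i ∈ st
  · simp only [hmem, decide_true]
    rw [solBS_iff st i hs ((st.length : Int) - 1 + 1 - 0).toNat 0 ((st.length : Int) - 1)
        (le_refl _) (le_refl _) (by omega)]
    obtain ⟨k, hk, hget⟩ := List.mem_iff_getElem.mp hmem
    exact ⟨k, by omega, by omega, by rw [List.getElem?_eq_getElem hk, hget]⟩
  · simp only [hmem, decide_false]
    rw [Bool.eq_false_iff, Ne, solBS_iff st i hs ((st.length : Int) - 1 + 1 - 0).toNat 0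
        ((st.length : Int) - 1) (le_refl _) (le_refl _) (by omega)]
    rintro ⟨k, hk1, hk2, hk3⟩
    exact hmem (List.mem_iff_getElem?.mpr ⟨k, hk3⟩)

-- ''.join concatenates: empty separator peels off the head
lemma str_join_empty_cons (a : String) (l : List String) :
    PySem.Str.join "" (a :: l) = a ++ PySem.Str.join "" l := by
  cases l with
  | nil =>
    simp only [PySem.Str.join, PySem.Chars.join, List.map]
    apply String.ext
    simp [List.intercalate]
  | cons b t =>
    simp only [PySem.Str.join, PySem.Chars.join, List.map]
    apply String.ext
    simp [List.intercalate, List.intersperse]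

-- A's string-building fold equals B's join of the mapped answers
lemma foldl_append_eq_join (g : Int → String) :
    ∀ (l : List Int) (acc : String),
      l.foldl (fun a i => a ++ g i) acc = acc ++ PySem.Str.join "" (l.map g) := by
  intro l
  induction l with
  | nil =>
    intro acc
    simp only [List.foldl_nil, List.map_nil]
    apply String.ext
    simp [PySem.Str.join, PySem.Chars.join, List.intercalate]
  | cons x t ih =>
    intro acc
    rw [List.map_cons, str_join_empty_cons, List.foldl_cons, ih, String.append_assoc]

-- the whole loop body of A equals the whole expression of B, for any sorted list
lemma main_eq (st : List Int) (req : List Int) (hs : st.Pairwise (· ≤ ·)) :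
    req.foldl
      (fun acc i => if solBS st i 0 ((st.length : Int) - 1) then acc ++ "Yes " else acc ++ "No ") ""
    = PySem.Str.join ""
        (req.map (fun i => if PySem.Set.contains (PySem.Set.ofList st) i then "Yes " else "No ")) := by
  have hif : (fun (a : String) (i : Int) =>
      if solBS st i 0 ((st.length : Int) - 1) then a ++ "Yes " else a ++ "No ")
      = fun a i => a ++ (if PySem.Set.contains (PySem.Set.ofList st) i then "Yes " else "No ") := by
    funext a i
    have h1 : solBS st i 0 ((st.length : Int) - 1) = decide (i ∈ st) := solBS_eq_mem st i hs
    have h2 : PySem.Set.contains (PySem.Set.ofList st) i = decide (i ∈ st) := by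
      simp only [PySem.Set.contains]
      by_cases h : i ∈ st
      · simp [h, (PySem.Set.mem_ofList st i).mpr h]
      · simp only [h, decide_false, List.contains_eq_mem, decide_eq_false_iff_not]
        intro hm; exact h ((PySem.Set.mem_ofList st i).mp hm)
    rw [h1, h2]
    by_cases h : i ∈ st
    · simp [h]
    · simp [h]
  rw [hif, foldl_append_eq_join]
  apply String.ext
  simp

-- ===== VERDICT (by name: the statement is the Claim_ definition above) =====
theorem solution_spec : Claim_equal_solution := by
  intro storage request _
  unfold Spec_solution solution solution_alt
  exact main_eq (PySem.List.sorted storage (fun x => x)) request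
    (PySem.List.sorted_pairwise storage (fun x => x))
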